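-- pv_equiv track=rewrite | github.com/Jeihyuck/Jeihyuck-rolling-k-auto-trade-KIS-refacored | trader/config.py | _parse_strategy_priority
-- ===== SOURCE A (Python) =====
-- def _parse_strategy_priority(raw: str) -> list[int]:
--     priorities: list[int] = []
--     for item in raw.split(","):
--         item = item.strip()
--         if not item:
--             continue
--         try:
--             value = int(item)
--         except ValueError:
--             continue
--         if 1 <= value <= 5 and value not in priorities:
--             priorities.append(value)
--     return priorities or [5, 4, 3, 2, 1]
-- ===== SOURCE B (Python) =====
-- def _parse_strategy_priority(raw: str) -> list[int]:
--     def pick(parts: list[str], allowed: set[int]) -> list[int]: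
--         if not parts:
--             return []
--         head, rest = parts[0], parts[1:]
--         try:
--             value = int(head.strip())
--         except ValueError:
--             return pick(rest, allowed)
--         if value in allowed:
--             return [value] + pick(rest, allowed - {value})
--         return pick(rest, allowed)
--     chosen = pick(raw.split(","), {1, 2, 3, 4, 5})
--     return chosen or [5, 4, 3, 2, 1]
-- ===== Notes on version B (the rewrite author's own statement) =====
-- stated objective: alternative
-- what changed: Replaces A's iterative append-with-seen-list-membership loop by a recursive front-to-back construction: pick() conses each accepted value and recurses on the remaining parts with a shrinking allowed set ({1..5} minus values already taken), so the range test and the duplicate test of A collapse into one membership in that set and no output accumulator exists.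
import Mathlib
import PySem

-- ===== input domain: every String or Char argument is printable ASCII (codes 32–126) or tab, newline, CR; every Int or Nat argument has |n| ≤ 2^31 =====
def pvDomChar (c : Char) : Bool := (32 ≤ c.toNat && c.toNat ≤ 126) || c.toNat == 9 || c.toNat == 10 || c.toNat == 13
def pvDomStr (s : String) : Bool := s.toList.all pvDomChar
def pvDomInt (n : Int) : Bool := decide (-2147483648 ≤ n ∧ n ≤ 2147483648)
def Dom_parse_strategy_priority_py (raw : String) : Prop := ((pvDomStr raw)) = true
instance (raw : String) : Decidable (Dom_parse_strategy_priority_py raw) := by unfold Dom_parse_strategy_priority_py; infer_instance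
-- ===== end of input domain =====

-- B: alternative decomposition — a recursion that conses each accepted value and shrinks an allowed set
-- {1..5} minus the values already taken, instead of A's append loop with a seen-list membership test.

-- ===== PORT A =====
-- the body of A's for-loop over raw.split(",")
def pvStepA (priorities : List Int) (item : List Char) : List Int :=
  let item := PySem.Chars.strip item
  if item = [] then priorities
  else
    match PySem.Int.ofChars? item with
    | none => priorities
    | some value =>
        if 1 ≤ value ∧ value ≤ 5 ∧ value ∉ priorities then priorities ++ [value]
        else priorities

def parse_strategy_priority_py (raw : String) : List Int :=
  let priorities := (PySem.Chars.splitOn raw.toList [',']).foldl pvStepA []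
  if priorities = [] then [5, 4, 3, 2, 1] else priorities

-- ===== PORT B =====
-- Source B's pick(parts, allowed): recursion on the list of parts, shrinking the allowed set
def pvPick (parts : List (List Char)) (allowed : PySem.Set Int) : List Int :=
  match parts with
  | [] => []
  | head :: rest =>
    match PySem.Int.ofChars? (PySem.Chars.strip head) with
    | none => pvPick rest allowed
    | some value =>
        if value ∈ allowed then value :: pvPick rest (PySem.Set.diff allowed [value])
        else pvPick rest allowed

def parse_strategy_priority_py_alt (raw : String) : List Int :=
  let chosen := pvPick (PySem.Chars.splitOn raw.toList [',']) (PySem.Set.ofList [1, 2, 3, 4, 5])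
  if chosen = [] then [5, 4, 3, 2, 1] else chosen

-- ===== PRECONDITION & SPEC =====
def Spec_parse_strategy_priority_py (raw : String) (out : List Int) : Prop := out = parse_strategy_priority_py_alt raw
instance (raw : String) (out : List Int) : Decidable (Spec_parse_strategy_priority_py raw out) := by unfold Spec_parse_strategy_priority_py; infer_instance

-- ===== CLAIM (what is proved, stated in full; the proofs are below) =====
def Claim_equal_parse_strategy_priority_py : Prop := ∀ (raw : String), Dom_parse_strategy_priority_py raw → Spec_parse_strategy_priority_py raw (parse_strategy_priority_py raw)

-- ===== LEMMAS AND PROOFS =====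

-- int('') is a ValueError
lemma pvOfChars_nil : PySem.Int.ofChars? ([] : List Char) = none := by decide

-- A's loop = B's recursion, under the invariant that 'allowed' is exactly
-- the in-range values not yet in A's accumulator.
lemma pvPick_foldl (parts : List (List Char)) :
    ∀ (acc : List Int) (allowed : PySem.Set Int),
      (∀ v : Int, v ∈ allowed ↔ (1 ≤ v ∧ v ≤ 5 ∧ v ∉ acc)) →
      parts.foldl pvStepA acc = acc ++ pvPick parts allowed := by
  induction parts with
  | nil => intro acc allowed _; simp [pvPick]
  | cons head rest ih =>
      intro acc allowed hinv
      have hstep : pvStepA acc head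
          = match PySem.Int.ofChars? (PySem.Chars.strip head) with
            | none => acc
            | some v => if 1 ≤ v ∧ v ≤ 5 ∧ v ∉ acc then acc ++ [v] else acc := by
        simp only [pvStepA]
        by_cases hemp : PySem.Chars.strip head = []
        · simp [hemp, pvOfChars_nil]
        · rw [if_neg hemp]
      cases hv : PySem.Int.ofChars? (PySem.Chars.strip head) with
      | none =>
          have hA : pvStepA acc head = acc := by rw [hstep, hv]
          simp only [List.foldl_cons, hA, pvPick, hv]
          exact ih acc allowed hinv
      | some v =>
          have hA : pvStepA acc head = if 1 ≤ v ∧ v ≤ 5 ∧ v ∉ acc then acc ++ [v] else acc := by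
            rw [hstep, hv]
          simp only [List.foldl_cons, hA, pvPick, hv]
          by_cases hmem : v ∈ allowed
          · have hcond : 1 ≤ v ∧ v ≤ 5 ∧ v ∉ acc := (hinv v).mp hmem
            rw [if_pos hcond, if_pos hmem]
            have hinv' : ∀ w : Int, w ∈ PySem.Set.diff allowed [v] ↔ (1 ≤ w ∧ w ≤ 5 ∧ w ∉ acc ++ [v]) := by
              intro w
              rw [PySem.Set.mem_diff, hinv w]
              simp [List.mem_append]
              tauto
            rw [ih (acc ++ [v]) _ hinv']
            simp
          · have hcond : ¬ (1 ≤ v ∧ v ≤ 5 ∧ v ∉ acc) := fun h => hmem ((hinv v).mpr h)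
            rw [if_neg hcond, if_neg hmem]
            exact ih acc allowed hinv

-- the initial invariant: allowed = {1,2,3,4,5}, accumulator = []
lemma pvInit_inv (v : Int) : v ∈ PySem.Set.ofList [1, 2, 3, 4, 5] ↔ (1 ≤ v ∧ v ≤ 5 ∧ v ∉ ([] : List Int)) := by
  rw [PySem.Set.mem_ofList]
  simp only [List.mem_cons, List.not_mem_nil, or_false, not_false_iff, and_true]
  constructor
  · rintro (rfl | rfl | rfl | rfl | rfl) <;> omega
  · rintro ⟨h1, h5⟩; omega

-- ===== VERDICT (by name: the statement is the Claim_ definition above) =====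
theorem parse_strategy_priority_py_spec : Claim_equal_parse_strategy_priority_py := by
  intro raw _
  unfold Spec_parse_strategy_priority_py parse_strategy_priority_py parse_strategy_priority_py_alt
  rw [pvPick_foldl _ [] _ pvInit_inv]
  simp
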